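-- pv_equiv track=rewrite | github.com/ShapalinVitaliy/DNS-2Mix | create_metadata.py | count_total_mixtures
-- ===== SOURCE A (Python) =====
-- from typing import Dict, List
--
-- SpeakersDict = Dict[str, List[str]]
--
-- def _non_empty_sorted_speakers(speakers: SpeakersDict):
--     return [(name, utts) for name, utts in sorted(speakers.items()) if utts]
--
-- def count_total_mixtures(speakers: SpeakersDict) -> int:
--     """Подсчитать общее число уникальных смесей (len_i * len_j по всем неупорядоченным парам)."""
--     non_empty = _non_empty_sorted_speakers(speakers)
--     sizes = [len(utts) for _, utts in non_empty]
--     total = 0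
--     n = len(sizes)
--     for i in range(n):
--         for j in range(i + 1, n):
--             total += sizes[i] * sizes[j]
--     return total
-- ===== SOURCE B (Python) =====
-- def count_total_mixtures(speakers):
--     """One-pass closed form: sum of products over unordered pairs = (S^2 - Q) // 2."""
--     s = 0
--     q = 0
--     for utts in speakers.values():
--         n = len(utts)
--         s += n
--         q += n * n
--     return (s * s - q) // 2
-- ===== Notes on version B (the rewrite author's own statement) =====
-- stated objective: faster
-- what changed: Replaces the sort, the non-empty filter and the O(n^2) double loop over pairs by a single pass accumulating the sum S and sum of squares Q of the speaker sizes and returning (S*S - Q)//2.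
import Mathlib
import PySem

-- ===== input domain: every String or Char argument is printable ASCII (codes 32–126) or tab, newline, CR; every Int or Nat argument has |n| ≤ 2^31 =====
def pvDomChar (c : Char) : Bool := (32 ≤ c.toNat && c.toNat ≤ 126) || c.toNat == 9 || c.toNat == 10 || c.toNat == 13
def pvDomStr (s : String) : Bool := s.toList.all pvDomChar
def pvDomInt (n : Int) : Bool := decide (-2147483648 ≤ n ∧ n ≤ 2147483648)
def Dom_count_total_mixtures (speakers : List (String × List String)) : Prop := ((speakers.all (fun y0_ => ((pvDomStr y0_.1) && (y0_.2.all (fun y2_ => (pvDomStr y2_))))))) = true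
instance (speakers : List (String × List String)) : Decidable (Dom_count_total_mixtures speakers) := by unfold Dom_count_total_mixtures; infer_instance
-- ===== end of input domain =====

-- B replaces A's sort, non-empty filter and O(n^2) pair loop by one pass computing
-- S = sum of sizes and Q = sum of squared sizes and returning (S^2 - Q) // 2 (faster).


-- ===== PORT A =====
-- helper: [(name, utts) for name, utts in sorted(speakers.items()) if utts]
-- (dict keys are unique, so sorting the items by the name is sorting by the full tuple)
def non_empty_sorted_speakers (speakers : List (String × List String)) : List (String × List String) :=
  (PySem.List.sorted speakers (fun p => p.1) false).filter (fun p => !p.2.isEmpty)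

def count_total_mixtures (speakers : List (String × List String)) : Int :=
  let non_empty := non_empty_sorted_speakers speakers
  let sizes : List Int := non_empty.map (fun p => (p.2.length : Int))
  let n : Int := sizes.length
  (PySem.List.pyRange 0 n 1).foldl (fun total i =>
    (PySem.List.pyRange (i + 1) n 1).foldl (fun t j =>
      t + PySem.List.pyGetD sizes i 0 * PySem.List.pyGetD sizes j 0) total) 0

-- ===== PORT B =====
def count_total_mixtures_alt (speakers : List (String × List String)) : Int :=
  let sq : Int × Int := speakers.foldl
    (fun (acc : Int × Int) p =>
      (acc.1 + (p.2.length : Int), acc.2 + (p.2.length : Int) * (p.2.length : Int))) (0, 0)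
  PySem.Int.floordiv (sq.1 * sq.1 - sq.2) 2

-- ===== PRECONDITION & SPEC =====
def Spec_count_total_mixtures (speakers : List (String × List String)) (out : Int) : Prop := out = count_total_mixtures_alt speakers
instance (speakers : List (String × List String)) (out : Int) : Decidable (Spec_count_total_mixtures speakers out) := by unfold Spec_count_total_mixtures; infer_instance

-- ===== CLAIM (what is proved, stated in full; the proofs are below) =====
def Claim_equal_count_total_mixtures : Prop := ∀ (speakers : List (String × List String)), Dom_count_total_mixtures speakers → Spec_count_total_mixtures speakers (count_total_mixtures speakers)

-- ===== LEMMAS AND PROOFS =====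

-- sum over the unordered pairs of a list, peeled off the front
def pairSum : List Int → Int
  | [] => 0
  | a :: t => a * t.sum + pairSum t

-- the inner loop of A adds c * (sum of the tail beyond index k)
theorem inner_loop_eq (zs : List Int) (c total : Int) (k : Nat) :
    (PySem.List.pyRange ((k : Int) + 1) (zs.length : Int) 1).foldl
      (fun t j => t + c * PySem.List.pyGetD zs j 0) total
    = total + c * (zs.drop (k + 1)).sum := by
  have h1 := PySem.List.foldl_pyRange_pyGetD' (xs := zs) (a := (k : Int) + 1) (d := 0)
      (f := fun t x => t + c * x) (init := total) (by positivity)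
  have h2 : (((k : Int) + 1)).toNat = k + 1 := by omega
  rw [h1, h2, PySem.List.foldl_add (g := fun x => c * x)]
  simp only [← smul_eq_mul, List.smul_sum]

-- A's double loop computes pairSum of the sizes list
theorem range_sum_eq_pairSum (zs : List Int) :
    ((List.range zs.length).map (fun k => zs.getD k 0 * (zs.drop (k + 1)).sum)).sum
      = pairSum zs := by
  induction zs with
  | nil => simp [pairSum]
  | cons a t ih =>
    rw [List.length_cons, List.range_succ_eq_map, List.map_cons, List.map_map, List.sum_cons]
    simp only [Function.comp_def, List.getD_cons_succ, List.getD_cons_zero, List.drop_succ_cons,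
      List.drop_zero]
    rw [pairSum, ih]

theorem loopA_eq_pairSum (zs : List Int) :
    (PySem.List.pyRange 0 (zs.length : Int) 1).foldl (fun total i =>
      (PySem.List.pyRange (i + 1) (zs.length : Int) 1).foldl (fun t j =>
        t + PySem.List.pyGetD zs i 0 * PySem.List.pyGetD zs j 0) total) 0
    = pairSum zs := by
  rw [PySem.List.pyRange_zero_nat, List.foldl_map]
  have hbody : (fun (total : Int) (k : Nat) =>
      (PySem.List.pyRange ((k : Int) + 1) (zs.length : Int) 1).foldl (fun t j =>
        t + PySem.List.pyGetD zs (k : Int) 0 * PySem.List.pyGetD zs j 0) total)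
      = fun (total : Int) (k : Nat) => total + zs.getD k 0 * (zs.drop (k + 1)).sum := by
    funext total k
    rw [inner_loop_eq zs (PySem.List.pyGetD zs (k : Int) 0) total k,
      PySem.List.pyGetD_natCast]
  rw [hbody, PySem.List.foldl_add (g := fun k => zs.getD k 0 * (zs.drop (k + 1)).sum),
    range_sum_eq_pairSum, zero_add]

-- the closed form: 2 * pairSum zs = (sum zs)^2 - sum of squares
theorem two_mul_pairSum (zs : List Int) :
    2 * pairSum zs = zs.sum * zs.sum - (zs.map (fun x => x * x)).sum := by
  induction zs with
  | nil => simp [pairSum]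
  | cons a t ih =>
    simp only [pairSum, List.sum_cons, List.map_cons]
    ring_nf
    ring_nf at ih
    omega

-- B's fold computes (S, Q)
theorem bfold_eq (l : List (String × List String)) (s q : Int) :
    l.foldl (fun (acc : Int × Int) p =>
        (acc.1 + (p.2.length : Int), acc.2 + (p.2.length : Int) * (p.2.length : Int))) (s, q)
    = (s + (l.map (fun p => ((p.2.length : Int)))).sum,
       q + (l.map (fun p => ((p.2.length : Int)) * ((p.2.length : Int)))).sum) := by
  induction l generalizing s q with
  | nil => simp
  | cons p t ih => simp [ih]; constructor <;> ring

-- dropping the empty-utterance speakers changes neither S nor Q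
theorem filter_map_sum_eq (l : List (String × List String)) (f : Int → Int) (hf : f 0 = 0) :
    ((l.filter (fun p => !p.2.isEmpty)).map (fun p => f (p.2.length : Int))).sum
      = (l.map (fun p => f (p.2.length : Int))).sum := by
  induction l with
  | nil => rfl
  | cons p t ih =>
    by_cases h : p.2.isEmpty
    · have : p.2 = [] := List.isEmpty_iff.mp h
      simp [this, hf, ih]
    · simp [h, ih]

-- sorting is a permutation, so S and Q over the sorted list equal those over the original
theorem sorted_map_sum_eq (l : List (String × List String)) (g : String × List String → Int) :
    ((PySem.List.sorted l (fun p => p.1) false).map g).sum = (l.map g).sum := by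
  exact List.Perm.sum_eq (List.Perm.map g (PySem.List.sorted_perm l (fun p => p.1) false))

-- ===== VERDICT (by name: the statement is the Claim_ definition above) =====
theorem count_total_mixtures_spec : Claim_equal_count_total_mixtures := by
  intro speakers _
  unfold Spec_count_total_mixtures count_total_mixtures count_total_mixtures_alt
  simp only
  rw [bfold_eq, loopA_eq_pairSum]
  set zs : List Int := (non_empty_sorted_speakers speakers).map (fun p => (p.2.length : Int)) with hzs
  have hS : zs.sum = (speakers.map (fun p => ((p.2.length : Int)))).sum := by
    rw [hzs]
    unfold non_empty_sorted_speakers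
    have h := filter_map_sum_eq (PySem.List.sorted speakers (fun p => p.1) false) (fun x => x) rfl
    simp only [] at h
    rw [h, sorted_map_sum_eq]
  have hQ : (zs.map (fun x => x * x)).sum
      = (speakers.map (fun p => ((p.2.length : Int)) * ((p.2.length : Int)))).sum := by
    rw [hzs, List.map_map]
    unfold non_empty_sorted_speakers
    have h := filter_map_sum_eq (PySem.List.sorted speakers (fun p => p.1) false) (fun x => x * x)
      (by ring)
    simp only [Function.comp_def] at h ⊢
    rw [h, sorted_map_sum_eq]
  have h2 := two_mul_pairSum zs
  rw [PySem.Int.floordiv_eq_ediv_of_pos (by norm_num)]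
  simp only [zero_add, ← hS, ← hQ]
  omega
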